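-- pv_equiv track=rewrite | github.com/AlessandroConti11/Constant_Time-Parallel_Shuffling | djb_code/djb_code.py | cww_sort_ref
-- ===== SOURCE A (Python) =====
-- def cww_sort_ref(X):
--     L = []
--     for x in X:
--         L = ( [u for u in L if u<x]
--               + [x]
--               + [u+1 for u in L if x<=u]
--               )
--     return L
-- ===== SOURCE B (Python) =====
-- def cww_sort_ref(X):
--     # Maintain M where M[i] + i is the i-th element of A's list L.
--     # Inserting x becomes: binary-search the first position p with M[p] + p >= x,
--     # then insert x - p there; no rebuilding / incrementing of the tail.
--     M = []
--     for x in X: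
--         lo, hi = 0, len(M)
--         while lo < hi:
--             mid = (lo + hi) // 2
--             if M[mid] + mid < x:
--                 lo = mid + 1
--             else:
--                 hi = mid
--         M.insert(lo, x - lo)
--     return [m + i for i, m in enumerate(M)]
-- ===== Notes on version B (the rewrite author's own statement) =====
-- stated objective: faster
-- what changed: Instead of rebuilding the whole list each step (filter smaller, insert x, increment all larger elements), B stores M[i] = L[i] - i, binary-searches the unique insertion position p (first i with M[i]+i >= x) and inserts x-p, so the '+1 to every element >= x' disappears; a final pass adds the indices back.
import Mathlib
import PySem

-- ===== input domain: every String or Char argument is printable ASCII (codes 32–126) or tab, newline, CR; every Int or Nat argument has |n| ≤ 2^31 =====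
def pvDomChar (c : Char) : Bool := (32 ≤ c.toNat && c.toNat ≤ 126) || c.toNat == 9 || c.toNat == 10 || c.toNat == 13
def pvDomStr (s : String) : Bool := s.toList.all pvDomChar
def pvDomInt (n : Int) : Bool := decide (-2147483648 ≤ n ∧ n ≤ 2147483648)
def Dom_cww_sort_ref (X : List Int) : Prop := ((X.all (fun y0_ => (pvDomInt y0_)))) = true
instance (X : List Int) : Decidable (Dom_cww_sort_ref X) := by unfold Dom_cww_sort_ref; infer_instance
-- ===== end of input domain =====

-- B replaces A's per-step full rebuild (filter smaller / insert x / +1 on every element ≥ x) by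
-- keeping M[i] = L[i] - i, binary-searching the insertion position and inserting x - p there.

-- ===== PORT A =====
def cww_sort_ref (X : List Int) : List Int :=
  X.foldl (fun L x =>
    (L.filter (fun u => u < x)) ++ [x] ++ ((L.filter (fun u => x ≤ u)).map (fun u => u + 1))) []

-- ===== PORT B =====
-- the hand-written binary-search while-loop of Source B (mid = (lo+hi)//2, written inline)
def pvBs (M : List Int) (x : Int) (lo hi : Nat) : Nat :=
  if lo < hi then
    if M.getD ((lo + hi) / 2) 0 + (((lo + hi) / 2 : Nat) : Int) < x then
      pvBs M x ((lo + hi) / 2 + 1) hi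
    else
      pvBs M x lo ((lo + hi) / 2)
  else lo
termination_by hi - lo
decreasing_by all_goals omega

def cww_sort_ref_alt (X : List Int) : List Int :=
  let M := X.foldl (fun M x =>
    let p := pvBs M x 0 M.length
    M.insertIdx p (x - (p : Int))) []
  M.mapIdx (fun i m => m + (i : Int))

-- ===== PRECONDITION & SPEC =====
def Spec_cww_sort_ref (X : List Int) (out : List Int) : Prop := out = cww_sort_ref_alt X
instance (X : List Int) (out : List Int) : Decidable (Spec_cww_sort_ref X out) := by unfold Spec_cww_sort_ref; infer_instance

-- ===== CLAIM (what is proved, stated in full; the proofs are below) =====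
def Claim_equal_cww_sort_ref : Prop := ∀ (X : List Int), Dom_cww_sort_ref X → Spec_cww_sort_ref X (cww_sort_ref X)

-- ===== LEMMAS AND PROOFS =====

-- addFrom k M = [m + k + i for i, m in enumerate M]
def addFrom (k : Int) : List Int → List Int
  | [] => []
  | m :: t => (m + k) :: addFrom (k + 1) t

theorem length_addFrom (k : Int) (M : List Int) : (addFrom k M).length = M.length := by
  induction M generalizing k with
  | nil => rfl
  | cons m t ih => simp [addFrom, ih]

theorem getElem_addFrom (k : Int) (M : List Int) (i : Nat) (h : i < M.length) :
    (addFrom k M)[i]'(by rw [length_addFrom]; exact h) = M[i] + k + i := by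
  induction M generalizing k i with
  | nil => simp at h
  | cons m t ih =>
    cases i with
    | zero => simp [addFrom]
    | succ j =>
      simp only [addFrom, List.getElem_cons_succ]
      rw [ih (k + 1) j (by simpa using h)]
      push_cast; ring

theorem addFrom_succ (k : Int) (M : List Int) :
    addFrom (k + 1) M = (addFrom k M).map (fun u => u + 1) := by
  induction M generalizing k with
  | nil => rfl
  | cons m t ih =>
    simp only [addFrom, List.map_cons, ih]
    congr 1
    ring

theorem mapIdx_eq_addFrom (M : List Int) :
    M.mapIdx (fun i m => m + (i : Int)) = addFrom 0 M := by
  apply List.ext_getElem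
  · simp [length_addFrom]
  · intro i h1 h2
    rw [getElem_addFrom]
    · simp
    · simpa [length_addFrom] using h2

theorem addFrom_insertIdx (M : List Int) (p : Nat) (v k : Int) (hp : p ≤ M.length) :
    addFrom k (M.insertIdx p v) =
      (addFrom k M).take p ++ [v + k + p] ++ ((addFrom k M).drop p).map (fun u => u + 1) := by
  induction M generalizing p k with
  | nil =>
    have hp0 : p = 0 := by simpa using hp
    subst hp0
    simp [addFrom]
  | cons m t ih =>
    cases p with
    | zero =>
      simp only [List.insertIdx_zero, addFrom, List.take_zero, List.nil_append,
        List.drop_zero, addFrom_succ]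
      simp
      ring
    | succ q =>
      simp only [List.insertIdx_succ_cons, addFrom, List.take_succ_cons, List.drop_succ_cons]
      rw [ih q (k + 1) (by simpa using hp)]
      simp only [List.cons_append]
      congr 3
      push_cast; ring

-- binary-search correctness when i ↦ M[i]+i is "x-downward-closed"
theorem pvBs_spec (M : List Int) (x : Int)
    (mono : ∀ i j : Nat, i ≤ j → j < M.length →
      M.getD j 0 + (j : Int) < x → M.getD i 0 + (i : Int) < x) :
    ∀ lo hi : Nat, lo ≤ hi → hi ≤ M.length →
    (∀ i : Nat, i < M.length → i < lo → M.getD i 0 + (i : Int) < x) →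
    (∀ i : Nat, i < M.length → hi ≤ i → ¬ M.getD i 0 + (i : Int) < x) →
    lo ≤ pvBs M x lo hi ∧ pvBs M x lo hi ≤ hi ∧
    (∀ i : Nat, i < M.length → i < pvBs M x lo hi → M.getD i 0 + (i : Int) < x) ∧
    (∀ i : Nat, i < M.length → pvBs M x lo hi ≤ i → ¬ M.getD i 0 + (i : Int) < x) := by
  suffices h : ∀ n lo hi : Nat, hi - lo = n → lo ≤ hi → hi ≤ M.length →
      (∀ i : Nat, i < M.length → i < lo → M.getD i 0 + (i : Int) < x) →
      (∀ i : Nat, i < M.length → hi ≤ i → ¬ M.getD i 0 + (i : Int) < x) →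
      lo ≤ pvBs M x lo hi ∧ pvBs M x lo hi ≤ hi ∧
      (∀ i : Nat, i < M.length → i < pvBs M x lo hi → M.getD i 0 + (i : Int) < x) ∧
      (∀ i : Nat, i < M.length → pvBs M x lo hi ≤ i → ¬ M.getD i 0 + (i : Int) < x) by
    exact fun lo hi => h (hi - lo) lo hi rfl
  intro n
  induction n using Nat.strong_induction_on with
  | _ n ih =>
    intro lo hi hfuel hlh hhi hlow hhigh
    rw [pvBs]
    by_cases hcmp : lo < hi
    · rw [if_pos hcmp]
      have hmlen : (lo + hi) / 2 < M.length := by omega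
      by_cases hc : M.getD ((lo + hi) / 2) 0 + (((lo + hi) / 2 : Nat) : Int) < x
      · rw [if_pos hc]
        have := ih (hi - ((lo + hi) / 2 + 1)) (by omega) ((lo + hi) / 2 + 1) hi rfl
          (by omega) hhi
          (by intro i h hi'; exact mono i ((lo + hi) / 2) (by omega) hmlen hc)
          hhigh
        exact ⟨by omega, this.2.1, this.2.2.1, this.2.2.2⟩
      · rw [if_neg hc]
        have := ih ((lo + hi) / 2 - lo) (by omega) lo ((lo + hi) / 2) rfl
          (by omega) (by omega) hlow
          (by intro i h hi' hcon; exact hc (mono ((lo + hi) / 2) i hi' h hcon))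
        exact ⟨this.1, by omega, this.2.2.1, this.2.2.2⟩
    · rw [if_neg hcmp]
      exact ⟨le_refl _, hlh, hlow, by intro i h hli; exact hhigh i h (by omega)⟩

-- filters of a positionally split list
theorem filter_lt_eq_take (L : List Int) (x : Int) (p : Nat) (hp : p ≤ L.length)
    (hlow : ∀ i : Nat, (h : i < L.length) → i < p → L[i] < x)
    (hhigh : ∀ i : Nat, (h : i < L.length) → p ≤ i → ¬ L[i] < x) :
    L.filter (fun u => u < x) = L.take p ∧ L.filter (fun u => x ≤ u) = L.drop p := by
  induction L generalizing p with
  | nil => simp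
  | cons a t ih =>
    cases p with
    | zero =>
      constructor
      · rw [List.take_zero, List.filter_eq_nil_iff]
        intro b hb
        rcases List.mem_iff_getElem.mp hb with ⟨i, hi, rfl⟩
        have := hhigh i hi (Nat.zero_le i)
        simp only [decide_eq_true_eq]
        omega
      · rw [List.drop_zero, List.filter_eq_self]
        intro b hb
        rcases List.mem_iff_getElem.mp hb with ⟨i, hi, rfl⟩
        have := hhigh i hi (Nat.zero_le i)
        simp only [decide_eq_true_eq]
        omega
    | succ q =>
      have ha : a < x := hlow 0 (by simp) (by omega)
      have := ih q (by simpa using hp)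
        (fun i h hi => hlow (i + 1) (by simpa using h) (by omega))
        (fun i h hi => hhigh (i + 1) (by simpa using h) (by omega))
      constructor
      · simp [ha, this.1]
      · simp [show ¬ x ≤ a by omega, this.2]

-- one step of A equals one step of B, and strict sortedness is preserved
theorem step_eq (M : List Int) (x : Int) (hs : (addFrom 0 M).Pairwise (· < ·)) :
    ((addFrom 0 M).filter (fun u => u < x)) ++ [x] ++
      (((addFrom 0 M).filter (fun u => x ≤ u)).map (fun u => u + 1))
      = addFrom 0 (M.insertIdx (pvBs M x 0 M.length) (x - (pvBs M x 0 M.length : Int)))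
    ∧ (addFrom 0 (M.insertIdx (pvBs M x 0 M.length) (x - (pvBs M x 0 M.length : Int)))).Pairwise (· < ·) := by
  have hgd : ∀ (i : Nat) (h : i < M.length), M.getD i 0 + (i : Int)
      = (addFrom 0 M)[i]'(by rw [length_addFrom]; exact h) := by
    intro i h
    rw [List.getD_eq_getElem M 0 h, getElem_addFrom 0 M i h]
    ring
  have hpl : ∀ i j : Nat, i < j → j < M.length →
      M.getD i 0 + (i : Int) < M.getD j 0 + (j : Int) := by
    intro i j hij hj
    rw [hgd i (by omega), hgd j hj]
    exact (List.pairwise_iff_getElem.mp hs) i j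
      (by rw [length_addFrom]; omega) (by rw [length_addFrom]; exact hj) hij
  have mono : ∀ i j : Nat, i ≤ j → j < M.length →
      M.getD j 0 + (j : Int) < x → M.getD i 0 + (i : Int) < x := by
    intro i j hij hj hlt
    rcases Nat.lt_or_ge i j with h | h
    · exact lt_trans (hpl i j h hj) hlt
    · have hij' : i = j := by omega
      subst hij'; exact hlt
  obtain ⟨-, hple, hlow, hhigh⟩ :=
    pvBs_spec M x mono 0 M.length (Nat.zero_le _) (le_refl _)
      (by intro i h hi; omega) (by intro i h hig; exact absurd h (Nat.not_lt.mpr hig))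
  set p := pvBs M x 0 M.length with hp
  have hLlen : (addFrom 0 M).length = M.length := length_addFrom 0 M
  have hlowL : ∀ i : Nat, (h : i < (addFrom 0 M).length) → i < p →
      (addFrom 0 M)[i] < x := by
    intro i h hi
    have := hlow i (by omega) hi
    rwa [hgd i (by omega)] at this
  have hhighL : ∀ i : Nat, (h : i < (addFrom 0 M).length) → p ≤ i →
      ¬ (addFrom 0 M)[i] < x := by
    intro i h hi
    have := hhigh i (by omega) hi
    rwa [hgd i (by omega)] at this
  obtain ⟨hf1, hf2⟩ := filter_lt_eq_take (addFrom 0 M) x p (by omega) hlowL hhighL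
  have hins := addFrom_insertIdx M p (x - (p : Int)) 0 hple
  have hval : x - (p : Int) + 0 + (p : Int) = x := by ring
  rw [hval] at hins
  have heq : (addFrom 0 M).filter (fun u => u < x) ++ [x] ++
      ((addFrom 0 M).filter (fun u => x ≤ u)).map (fun u => u + 1)
      = addFrom 0 (M.insertIdx p (x - (p : Int))) := by
    rw [hf1, hf2, hins]
  refine ⟨heq, ?_⟩
  rw [hins]
  have htake : ∀ a ∈ (addFrom 0 M).take p, a < x := by
    intro a ha
    rcases List.mem_iff_getElem.mp ha with ⟨i, hi, rfl⟩
    rw [List.getElem_take]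
    have hi' := hi
    simp only [List.length_take] at hi'
    exact hlowL i (by omega) (by omega)
  have hdrop : ∀ b ∈ ((addFrom 0 M).drop p).map (fun u => u + 1), x < b := by
    intro b hb
    rcases List.mem_map.mp hb with ⟨c, hc, rfl⟩
    rcases List.mem_iff_getElem.mp hc with ⟨i, hi, rfl⟩
    rw [List.getElem_drop]
    have hlen : p + i < (addFrom 0 M).length := by simp at hi; omega
    have := hhighL (p + i) hlen (by omega)
    omega
  rw [List.append_assoc]
  apply (List.pairwise_append).mpr
  refine ⟨hs.sublist (List.take_sublist _ _), ?_, ?_⟩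
  · apply (List.pairwise_append).mpr
    refine ⟨List.pairwise_singleton _ _, ?_, ?_⟩
    · exact ((hs.sublist (List.drop_sublist _ _)).map _ (fun a b hab => by omega))
    · intro a ha b hb
      simp only [List.mem_singleton] at ha
      subst ha
      exact hdrop b hb
  · intro a ha b hb
    rcases List.mem_append.mp hb with hb | hb
    · simp only [List.mem_singleton] at hb
      subst hb
      exact htake a ha
    · exact lt_trans (htake a ha) (hdrop b hb)

theorem fold_eq (X : List Int) : ∀ M : List Int, (addFrom 0 M).Pairwise (· < ·) →
    X.foldl (fun L x =>
      (L.filter (fun u => u < x)) ++ [x] ++ ((L.filter (fun u => x ≤ u)).map (fun u => u + 1)))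
      (addFrom 0 M)
    = addFrom 0 (X.foldl (fun M x =>
        M.insertIdx (pvBs M x 0 M.length) (x - (pvBs M x 0 M.length : Int))) M) := by
  induction X with
  | nil => intro M _; rfl
  | cons x t ih =>
    intro M hs
    obtain ⟨heq, hs'⟩ := step_eq M x hs
    simp only [List.foldl_cons]
    rw [heq]
    exact ih _ hs'

-- ===== VERDICT (by name: the statement is the Claim_ definition above) =====
theorem cww_sort_ref_spec : Claim_equal_cww_sort_ref := by
  intro X _
  unfold Spec_cww_sort_ref cww_sort_ref cww_sort_ref_alt
  rw [mapIdx_eq_addFrom]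
  have := fold_eq X [] (by simp [addFrom])
  simpa [addFrom] using this
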